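-- pv_equiv track=rewrite | github.com/danielgaylord/advent-of-code | 2021/Day 22 - Reactor Reboot/code.py | flip_cuboid
-- ===== SOURCE A (Python) =====
-- def flip_cuboid(on, x_dim, y_dim, z_dim, bit):
--     for x in range(x_dim[0], x_dim[1] + 1):
--         for y in range(y_dim[0], y_dim[1] + 1):
--             for z in range(z_dim[0], z_dim[1] + 1):
--                 cuboid = (x, y, z)
--                 if bit == 1:
--                     on.add(cuboid)
--                 elif cuboid in on:
--                     on.remove(cuboid)
--
--     return on
-- ===== SOURCE B (Python) =====
-- def flip_cuboid(on, x_dim, y_dim, z_dim, bit):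
--     x0, x1 = x_dim
--     y0, y1 = y_dim
--     z0, z1 = z_dim
--     if bit == 1:
--         nx = x1 - x0 + 1
--         ny = y1 - y0 + 1
--         nz = z1 - z0 + 1
--         if nx > 0 and ny > 0 and nz > 0:
--             # one flat linear range, decoded to coordinates by div/mod
--             on.update((x0 + i // (ny * nz), y0 + i // nz % ny, z0 + i % nz)
--                       for i in range(nx * ny * nz))
--     else:
--         # drop existing points by an interval test on each point of `on`;
--         # the cuboid is never enumerated here
--         on.difference_update([p for p in on
--                               if x0 <= p[0] <= x1 and y0 <= p[1] <= y1 and z0 <= p[2] <= z1])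
--     return on
-- ===== Notes on version B (the rewrite author's own statement) =====
-- stated objective: alternative
-- what changed: B's off path removes points by a single interval-test pass over `on` (the cuboid is never enumerated, no membership tests); B's on path decodes one flat linear range by div/mod into coordinates instead of A's triple-nested per-cell add/remove loop.
import Mathlib
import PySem

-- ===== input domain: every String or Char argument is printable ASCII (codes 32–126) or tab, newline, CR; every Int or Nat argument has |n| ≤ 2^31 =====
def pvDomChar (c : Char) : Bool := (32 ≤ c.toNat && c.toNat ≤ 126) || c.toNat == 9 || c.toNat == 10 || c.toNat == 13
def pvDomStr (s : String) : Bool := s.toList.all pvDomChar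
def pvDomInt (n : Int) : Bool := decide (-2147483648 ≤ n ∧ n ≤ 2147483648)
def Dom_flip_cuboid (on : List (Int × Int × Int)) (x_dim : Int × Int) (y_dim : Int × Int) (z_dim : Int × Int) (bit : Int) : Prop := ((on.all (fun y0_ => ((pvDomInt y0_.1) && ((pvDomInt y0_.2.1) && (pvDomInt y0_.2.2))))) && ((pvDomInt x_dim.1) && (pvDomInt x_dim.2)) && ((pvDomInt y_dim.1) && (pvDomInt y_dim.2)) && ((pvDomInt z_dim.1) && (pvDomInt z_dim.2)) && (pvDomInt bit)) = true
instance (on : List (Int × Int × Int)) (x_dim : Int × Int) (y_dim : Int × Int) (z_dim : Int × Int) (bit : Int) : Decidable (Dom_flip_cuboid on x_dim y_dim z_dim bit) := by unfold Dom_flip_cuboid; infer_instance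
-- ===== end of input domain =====

-- B removes by one interval-test pass over `on` (the cuboid is never enumerated) and adds by
-- decoding a single flat linear range with div/mod instead of A's triple-nested per-cell loop
-- (objective: alternative). Both Pythons mutate the argument set `on` in place and return the
-- same object; the equivalence proved here is about the returned value.

-- ===== PORT A =====
-- A's `on.remove(cuboid)` runs only under the `cuboid in on` guard, where it equals Set.discard.
def flip_cuboid (on : List (Int × Int × Int)) (x_dim : Int × Int) (y_dim : Int × Int) (z_dim : Int × Int) (bit : Int) : List (Int × Int × Int) :=
  (PySem.List.pyRange x_dim.1 (x_dim.2 + 1) 1).foldl (fun on x =>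
    (PySem.List.pyRange y_dim.1 (y_dim.2 + 1) 1).foldl (fun on y =>
      (PySem.List.pyRange z_dim.1 (z_dim.2 + 1) 1).foldl (fun on z =>
        if bit = 1 then PySem.Set.add on (x, y, z)
        else if PySem.Set.contains on (x, y, z) then PySem.Set.discard on (x, y, z)
        else on) on) on) on

-- ===== PORT B =====
-- Transcription of Source B: the add path decodes range(nx*ny*nz) by floor-division/mod;
-- the remove path filters `on` by the interval test and difference_updates with that list.
def flip_cuboid_alt (on : List (Int × Int × Int)) (x_dim : Int × Int) (y_dim : Int × Int) (z_dim : Int × Int) (bit : Int) : List (Int × Int × Int) :=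
  let x0 := x_dim.1; let x1 := x_dim.2
  let y0 := y_dim.1; let y1 := y_dim.2
  let z0 := z_dim.1; let z1 := z_dim.2
  if bit = 1 then
    let nx := x1 - x0 + 1
    let ny := y1 - y0 + 1
    let nz := z1 - z0 + 1
    if nx > 0 && ny > 0 && nz > 0 then
      PySem.Set.update on ((PySem.List.pyRange 0 (nx * ny * nz) 1).map (fun i =>
        (x0 + PySem.Int.floordiv i (ny * nz),
         y0 + PySem.Int.mod (PySem.Int.floordiv i nz) ny,
         z0 + PySem.Int.mod i nz)))
    else on
  else
    PySem.Set.diff on (on.filter (fun p =>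
      decide (x0 ≤ p.1 ∧ p.1 ≤ x1) && decide (y0 ≤ p.2.1 ∧ p.2.1 ≤ y1) && decide (z0 ≤ p.2.2 ∧ p.2.2 ≤ z1)))

-- ===== PRECONDITION & SPEC =====
def Spec_flip_cuboid (on : List (Int × Int × Int)) (x_dim : Int × Int) (y_dim : Int × Int) (z_dim : Int × Int) (bit : Int) (out : List (Int × Int × Int)) : Prop := out = flip_cuboid_alt on x_dim y_dim z_dim bit
instance (on : List (Int × Int × Int)) (x_dim : Int × Int) (y_dim : Int × Int) (z_dim : Int × Int) (bit : Int) (out : List (Int × Int × Int)) : Decidable (Spec_flip_cuboid on x_dim y_dim z_dim bit out) := by unfold Spec_flip_cuboid; infer_instance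

-- ===== CLAIM (what is proved, stated in full; the proofs are below) =====
def Claim_equal_flip_cuboid : Prop := ∀ (on : List (Int × Int × Int)) (x_dim : Int × Int) (y_dim : Int × Int) (z_dim : Int × Int) (bit : Int), Dom_flip_cuboid on x_dim y_dim z_dim bit → Spec_flip_cuboid on x_dim y_dim z_dim bit (flip_cuboid on x_dim y_dim z_dim bit)

-- ===== LEMMAS AND PROOFS =====

-- 2D divmod decode of a flat range is the row-major product (Nat level).
theorem pv_decode2 (b c : Nat) :
    (List.range (b * c)).map (fun j => (j / c, j % c))
      = (List.range b).flatMap (fun y => (List.range c).map (fun z => (y, z))) := by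
  induction b with
  | zero => simp
  | succ b ih =>
      have h : (b + 1) * c = b * c + c := by ring
      rw [h, List.range_add, List.map_append, List.map_map, ih, List.range_succ,
        List.flatMap_append]
      congr 1
      simp only [List.flatMap_cons, List.flatMap_nil, List.append_nil]
      apply List.map_congr_left
      intro k hk
      have hkc : k < c := List.mem_range.mp hk
      have hc : 0 < c := by omega
      have h1 : (b * c + k) / c = b := by
        rw [Nat.mul_comm, Nat.mul_add_div hc, Nat.div_eq_of_lt hkc]
        omega
      have h2 : (b * c + k) % c = k := by
        rw [Nat.mul_comm, Nat.mul_add_mod, Nat.mod_eq_of_lt hkc]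
      simp [Function.comp, h1, h2]

-- 3D divmod decode of a flat range is the row-major triple product (Nat level).
theorem pv_decode3 (a b c : Nat) :
    (List.range (a * b * c)).map (fun i => (i / (b * c), i / c % b, i % c))
      = (List.range a).flatMap (fun x => (List.range b).flatMap (fun y =>
          (List.range c).map (fun z => (x, y, z)))) := by
  induction a with
  | zero => simp
  | succ a ih =>
      have h : (a + 1) * b * c = a * b * c + b * c := by ring
      rw [h, List.range_add, List.map_append, List.map_map, ih, List.range_succ,
        List.flatMap_append]
      congr 1
      simp only [List.flatMap_cons, List.flatMap_nil, List.append_nil]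
      have hdec : ∀ j ∈ List.range (b * c),
          ((fun i => (i / (b * c), i / c % b, i % c)) ∘ (fun k => a * b * c + k)) j
            = (fun j => (a, j / c, j % c)) j := by
        intro j hj
        have hjbc : j < b * c := List.mem_range.mp hj
        have hbc0 : 0 < b * c := by omega
        have hc : 0 < c := by
          rcases Nat.eq_zero_or_pos c with h0 | h0
          · subst h0; simp at hjbc
          · exact h0
        have h1 : (a * b * c + j) / (b * c) = a := by
          rw [show a * b * c = (b * c) * a by ring, Nat.mul_add_div hbc0,
            Nat.div_eq_of_lt hjbc]
          omega
        have h2 : (a * b * c + j) / c = c * (a * b) / c + j / c := by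
          rw [show a * b * c = c * (a * b) by ring, Nat.mul_add_div hc,
            Nat.mul_div_cancel_left _ hc]
        have hb : 0 < b := by
          rcases Nat.eq_zero_or_pos b with h0 | h0
          · subst h0; omega
          · exact h0
        have h3 : (a * b * c + j) / c % b = j / c := by
          rw [h2, Nat.mul_div_cancel_left _ hc, Nat.add_comm, Nat.add_mul_mod_self_right]
          exact Nat.mod_eq_of_lt (Nat.div_lt_of_lt_mul (by rwa [Nat.mul_comm] at hjbc))
        have h4 : (a * b * c + j) % c = j % c := by
          rw [show a * b * c = c * (a * b) by ring, Nat.mul_add_mod]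
        simp [Function.comp, h1, h3, h4]
      rw [List.map_congr_left hdec]
      have := congrArg (List.map (fun p : Nat × Nat => (a, p.1, p.2))) (pv_decode2 b c)
      simpa [List.map_map, List.map_flatMap, Function.comp] using this

-- Folding the guarded remove over L filters out every element of L.
theorem pv_foldl_remove_eq_filter {α : Type} [BEq α] [LawfulBEq α] :
    ∀ (L : List α) (s : List α),
      List.foldl (fun t c => if PySem.Set.contains t c then PySem.Set.discard t c else t) s L
        = s.filter (fun y => !(L.contains y)) := by
  intro L
  induction L with
  | nil => intro s; simp
  | cons c L ih =>
      intro s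
      have hstep : (if PySem.Set.contains s c then PySem.Set.discard s c else s)
          = s.filter (fun y => !(y == c)) := by
        by_cases h : c ∈ s
        · have hc : PySem.Set.contains s c = true := List.contains_iff_mem.mpr h
          simp only [hc, if_true]
          rfl
        · have hc : PySem.Set.contains s c = false := by
            simp [PySem.Set.contains, h]
          simp only [hc, Bool.false_eq_true, if_false]
          symm
          apply List.filter_eq_self.mpr
          intro y hy
          have hne : y ≠ c := fun e => h (e ▸ hy)
          simp [hne]
      simp only [List.foldl_cons, hstep, ih, List.filter_filter]
      apply List.filter_congr
      intro y _
      simp [Bool.not_or, Bool.and_comm]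

-- A's row-major cuboid list, and its membership characterisation.
def pvCube (x_dim y_dim z_dim : Int × Int) : List (Int × Int × Int) :=
  (PySem.List.pyRange x_dim.1 (x_dim.2 + 1) 1).flatMap (fun x =>
    (PySem.List.pyRange y_dim.1 (y_dim.2 + 1) 1).flatMap (fun y =>
      (PySem.List.pyRange z_dim.1 (z_dim.2 + 1) 1).map (fun z => (x, y, z))))

theorem pv_mem_cube (x_dim y_dim z_dim : Int × Int) (p : Int × Int × Int) :
    p ∈ pvCube x_dim y_dim z_dim ↔
      (x_dim.1 ≤ p.1 ∧ p.1 ≤ x_dim.2) ∧ (y_dim.1 ≤ p.2.1 ∧ p.2.1 ≤ y_dim.2) ∧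
        (z_dim.1 ≤ p.2.2 ∧ p.2.2 ≤ z_dim.2) := by
  obtain ⟨px, py, pz⟩ := p
  simp [pvCube, List.mem_flatMap, PySem.List.mem_pyRange_one]

-- A's nested fold, bit = 1 case: it is Set.update with the row-major cuboid list.
theorem pv_A_update (on : List (Int × Int × Int)) (x_dim y_dim z_dim : Int × Int) :
    flip_cuboid on x_dim y_dim z_dim 1 = PySem.Set.update on (pvCube x_dim y_dim z_dim) := by
  simp [flip_cuboid, pvCube, PySem.Set.update, List.foldl_flatMap, List.foldl_map]

-- B's decoded flat range equals the row-major cuboid list when all three sides are positive.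
theorem pv_decode_eq_cube (x_dim y_dim z_dim : Int × Int)
    (hx : x_dim.2 - x_dim.1 + 1 > 0) (hy : y_dim.2 - y_dim.1 + 1 > 0)
    (hz : z_dim.2 - z_dim.1 + 1 > 0) :
    ((PySem.List.pyRange 0 ((x_dim.2 - x_dim.1 + 1) * (y_dim.2 - y_dim.1 + 1) * (z_dim.2 - z_dim.1 + 1)) 1).map (fun i =>
        (x_dim.1 + PySem.Int.floordiv i ((y_dim.2 - y_dim.1 + 1) * (z_dim.2 - z_dim.1 + 1)),
         y_dim.1 + PySem.Int.mod (PySem.Int.floordiv i (z_dim.2 - z_dim.1 + 1)) (y_dim.2 - y_dim.1 + 1),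
         z_dim.1 + PySem.Int.mod i (z_dim.2 - z_dim.1 + 1))))
      = pvCube x_dim y_dim z_dim := by
  obtain ⟨x0, x1⟩ := x_dim; obtain ⟨y0, y1⟩ := y_dim; obtain ⟨z0, z1⟩ := z_dim
  simp only at hx hy hz ⊢
  set a := (x1 - x0 + 1).toNat with ha
  set b := (y1 - y0 + 1).toNat with hb
  set c := (z1 - z0 + 1).toNat with hc
  have hax : x1 - x0 + 1 = (a : Int) := by omega
  have hby : y1 - y0 + 1 = (b : Int) := by omega
  have hcz : z1 - z0 + 1 = (c : Int) := by omega
  have htot : (x1 - x0 + 1) * (y1 - y0 + 1) * (z1 - z0 + 1) = ((a * b * c : Nat) : Int) := by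
    rw [hax, hby, hcz]; push_cast; ring
  have hbc : (y1 - y0 + 1) * (z1 - z0 + 1) = ((b * c : Nat) : Int) := by
    rw [hby, hcz]; push_cast; ring
  rw [htot, hbc, hcz, hby, PySem.List.pyRange_one]
  have h1 : ((a * b * c : Nat) : Int) - 0 = ((a * b * c : Nat) : Int) := by ring
  rw [h1, Int.toNat_natCast, List.map_map]
  have hcongr : ∀ k ∈ List.range (a * b * c),
      ((fun i => (x0 + PySem.Int.floordiv i ((b * c : Nat) : Int),
          y0 + PySem.Int.mod (PySem.Int.floordiv i ((c : Nat) : Int)) ((b : Nat) : Int),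
          z0 + PySem.Int.mod i ((c : Nat) : Int))) ∘ (fun k : Nat => (0 : Int) + k)) k
        = (fun k : Nat => (x0 + ((k / (b * c) : Nat) : Int), y0 + ((k / c % b : Nat) : Int),
            z0 + ((k % c : Nat) : Int))) k := by
    intro k _
    simp only [Function.comp_apply, zero_add]
    rw [PySem.Int.floordiv_natCast k (b * c), PySem.Int.floordiv_natCast k c,
      PySem.Int.mod_natCast (k / c) b, PySem.Int.mod_natCast k c]
  have hcube : pvCube (x0, x1) (y0, y1) (z0, z1)
      = (List.range a).flatMap (fun (i : Nat) => (List.range b).flatMap (fun (j : Nat) =>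
          (List.range c).map (fun (k : Nat) => (x0 + (i : Int), y0 + (j : Int), z0 + (k : Int))))) := by
    unfold pvCube
    simp only [PySem.List.pyRange_one]
    rw [show x1 + 1 - x0 = (a : Int) by omega, show y1 + 1 - y0 = (b : Int) by omega,
      show z1 + 1 - z0 = (c : Int) by omega, Int.toNat_natCast, Int.toNat_natCast,
      Int.toNat_natCast]
    simp only [List.flatMap_map, List.map_map, Function.comp_def]
  rw [hcube, List.map_congr_left hcongr]
  have h3 := congrArg (List.map (fun q : Nat × Nat × Nat =>
    (x0 + (q.1 : Int), y0 + (q.2.1 : Int), z0 + (q.2.2 : Int)))) (pv_decode3 a b c)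
  simp only [List.map_map, List.map_flatMap, Function.comp_def] at h3
  exact h3

-- The main agreement theorem.
theorem pv_flip_eq (on : List (Int × Int × Int)) (x_dim y_dim z_dim : Int × Int) (bit : Int) :
    flip_cuboid on x_dim y_dim z_dim bit = flip_cuboid_alt on x_dim y_dim z_dim bit := by
  by_cases h : bit = 1
  · subst h
    rw [pv_A_update]
    simp only [flip_cuboid_alt]
    by_cases hpos : (x_dim.2 - x_dim.1 + 1 > 0) ∧ (y_dim.2 - y_dim.1 + 1 > 0) ∧ (z_dim.2 - z_dim.1 + 1 > 0)
    · obtain ⟨hx, hy, hz⟩ := hpos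
      have hg : (decide (x_dim.2 - x_dim.1 + 1 > 0) && decide (y_dim.2 - y_dim.1 + 1 > 0) &&
          decide (z_dim.2 - z_dim.1 + 1 > 0)) = true := by
        simp [hx, hy, hz]
      rw [if_pos hg, pv_decode_eq_cube x_dim y_dim z_dim hx hy hz]
      simp
    · have hguard : ¬ ((decide (x_dim.2 - x_dim.1 + 1 > 0) && decide (y_dim.2 - y_dim.1 + 1 > 0) &&
          decide (z_dim.2 - z_dim.1 + 1 > 0)) = true) := by
        simp only [Bool.and_eq_true, decide_eq_true_eq]
        rintro ⟨⟨h1, h2⟩, h3⟩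
        exact hpos ⟨h1, h2, h3⟩
      have hcube : pvCube x_dim y_dim z_dim = [] := by
        rcases (by simpa only [not_and_or, not_lt] using hpos : ¬ (x_dim.2 - x_dim.1 + 1 > 0) ∨ ¬ (y_dim.2 - y_dim.1 + 1 > 0) ∨ ¬ (z_dim.2 - z_dim.1 + 1 > 0)) with h0 | h0 | h0
        · simp [pvCube, PySem.List.pyRange_one_eq_nil (show x_dim.2 + 1 ≤ x_dim.1 by omega)]
        · simp [pvCube, PySem.List.pyRange_one_eq_nil (show y_dim.2 + 1 ≤ y_dim.1 by omega)]
        · simp [pvCube, PySem.List.pyRange_one_eq_nil (show z_dim.2 + 1 ≤ z_dim.1 by omega)]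
      rw [if_neg hguard, hcube]
      simp [PySem.Set.update]
  · -- removal case
    have hA : flip_cuboid on x_dim y_dim z_dim bit
        = (pvCube x_dim y_dim z_dim).foldl
            (fun t c => if PySem.Set.contains t c then PySem.Set.discard t c else t) on := by
      simp [flip_cuboid, pvCube, h, List.foldl_flatMap, List.foldl_map]
    rw [hA, pv_foldl_remove_eq_filter]
    simp only [flip_cuboid_alt, if_neg h, PySem.Set.diff]
    apply List.filter_congr
    intro p hp
    congr 1
    rw [Bool.eq_iff_iff]
    simp only [PySem.Set.contains, List.contains_iff_mem, List.mem_filter, Bool.and_eq_true,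
      decide_eq_true_eq, pv_mem_cube]
    constructor
    · rintro ⟨h1, h2, h3⟩
      exact ⟨hp, ⟨h1, h2⟩, h3⟩
    · rintro ⟨-, ⟨h1, h2⟩, h3⟩
      exact ⟨h1, h2, h3⟩

-- ===== VERDICT (by name: the statement is the Claim_ definition above) =====
theorem flip_cuboid_spec : Claim_equal_flip_cuboid := by
  intro on x_dim y_dim z_dim bit _
  unfold Spec_flip_cuboid
  exact pv_flip_eq on x_dim y_dim z_dim bit
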